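-- pv_equiv track=rewrite | github.com/OscarTsao/LLM_Projects | 4090_LLM/DataAug_Multi_Evidence/src/dataaug_multi_both/cli/evaluate_checkpoint.py | _infer_head_type
-- ===== SOURCE A (Python) =====
-- from typing import Any
--
-- def _infer_head_type(state_dict: dict[str, Any]) -> str:
--     keys = state_dict.keys()
--     if any(k.startswith("evidence_head.start_mlp") for k in keys):
--         return "start_end_mlp"
--     if any(k.startswith("evidence_head.start_linear") for k in keys):
--         return "start_end_linear"
--     if any("biaffine" in k for k in keys):
--         return "biaffine"
--     return "start_end_linear"
-- ===== SOURCE B (Python) =====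
-- _RANK_TABLE = ("start_end_mlp", "start_end_linear", "biaffine", "start_end_linear")
--
--
-- def _rank(key):
--     """Classify one key to a priority rank (0 best)."""
--     if key.startswith("evidence_head.start_mlp"):
--         return 0
--     if key.startswith("evidence_head.start_linear"):
--         return 1
--     if "biaffine" in key:
--         return 2
--     return 3
--
--
-- def _infer_head_type(state_dict):
--     return _RANK_TABLE[min(map(_rank, state_dict.keys()), default=3)]
-- ===== Notes on version B (the rewrite author's own statement) =====
-- stated objective: alternative
-- what changed: Instead of three global short-circuiting scans of the key set, B classifies each key individually to a numeric priority rank, takes the minimum rank over all keys, and maps that rank through a lookup table to the head-type name.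
import Mathlib
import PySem

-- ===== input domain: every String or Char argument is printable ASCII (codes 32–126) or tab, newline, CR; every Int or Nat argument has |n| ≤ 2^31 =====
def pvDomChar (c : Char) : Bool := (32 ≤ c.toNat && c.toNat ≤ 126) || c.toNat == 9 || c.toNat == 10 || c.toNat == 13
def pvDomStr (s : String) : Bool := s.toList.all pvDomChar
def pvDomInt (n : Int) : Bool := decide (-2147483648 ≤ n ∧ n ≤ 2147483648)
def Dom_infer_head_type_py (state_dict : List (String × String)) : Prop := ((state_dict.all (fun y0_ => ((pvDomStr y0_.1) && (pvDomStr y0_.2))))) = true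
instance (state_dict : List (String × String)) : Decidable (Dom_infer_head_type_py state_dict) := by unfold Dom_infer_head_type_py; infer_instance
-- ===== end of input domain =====

-- B replaces A's three global short-circuiting scans by a per-key numeric rank,
-- a minimum over the keys and a table lookup (alternative decomposition, same cost).

-- ===== PORT A =====
def infer_head_type_py (state_dict : List (String × String)) : String :=
  let keys := (PySem.Dict.ofList state_dict).keys
  if keys.any (fun k => PySem.Str.startswith k "evidence_head.start_mlp") then
    "start_end_mlp"
  else if keys.any (fun k => PySem.Str.startswith k "evidence_head.start_linear") then
    "start_end_linear"
  else if keys.any (fun k => PySem.Str.isIn "biaffine" k) then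
    "biaffine"
  else
    "start_end_linear"

-- ===== PORT B =====
def pvRank (key : String) : Nat :=
  if PySem.Str.startswith key "evidence_head.start_mlp" then 0
  else if PySem.Str.startswith key "evidence_head.start_linear" then 1
  else if PySem.Str.isIn "biaffine" key then 2
  else 3

def infer_head_type_py_alt (state_dict : List (String × String)) : String :=
  -- min(map(_rank, keys), default=3): min? over the mapped list, default 3 when empty
  let m := match PySem.List.min? ((PySem.Dict.ofList state_dict).keys.map pvRank) (fun x => x) with
    | some r => r
    | none => 3
  -- _RANK_TABLE[m]: the rank is always < 4, so the tuple indexing is exact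
  ["start_end_mlp", "start_end_linear", "biaffine", "start_end_linear"].getD m ""

-- ===== PRECONDITION & SPEC =====
def Spec_infer_head_type_py (state_dict : List (String × String)) (out : String) : Prop := out = infer_head_type_py_alt state_dict
instance (state_dict : List (String × String)) (out : String) : Decidable (Spec_infer_head_type_py state_dict out) := by unfold Spec_infer_head_type_py; infer_instance

-- ===== CLAIM =====
def Claim_equal_infer_head_type_py : Prop := ∀ (state_dict : List (String × String)), Dom_infer_head_type_py state_dict → Spec_infer_head_type_py state_dict (infer_head_type_py state_dict)

-- ===== LEMMAS AND PROOFS =====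

-- The running minimum of ranks, started at a, in terms of A's three any-scans.
set_option maxHeartbeats 1000000 in
theorem foldl_min_rank (ks : List String) (a : Nat) (ha : a ≤ 3) :
    (ks.map pvRank).foldl min a =
      if ks.any (fun k => PySem.Str.startswith k "evidence_head.start_mlp") then min a 0
      else if ks.any (fun k => PySem.Str.startswith k "evidence_head.start_linear") then min a 1
      else if ks.any (fun k => PySem.Str.isIn "biaffine" k) then min a 2
      else a := by
  induction ks generalizing a with
  | nil => simp
  | cons k ks ih =>
      simp only [List.map_cons, List.foldl_cons, List.any_cons]
      rw [ih (min a (pvRank k)) (by unfold pvRank; split_ifs <;> omega)]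
      unfold pvRank
      by_cases hb1 : PySem.Str.startswith k "evidence_head.start_mlp" = true <;>
        by_cases hb2 : PySem.Str.startswith k "evidence_head.start_linear" = true <;>
          by_cases hb3 : PySem.Str.isIn "biaffine" k = true <;>
            by_cases hc1 : (ks.any fun k => PySem.Str.startswith k "evidence_head.start_mlp") = true <;>
              by_cases hc2 : (ks.any fun k => PySem.Str.startswith k "evidence_head.start_linear") = true <;>
                by_cases hc3 : (ks.any fun k => PySem.Str.isIn "biaffine" k) = true <;>
                  simp only [Bool.not_eq_true] at hb1 hb2 hb3 hc1 hc2 hc3 <;>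
                  simp only [hb1, hb2, hb3, hc1, hc2, hc3, Bool.true_or, Bool.false_or] <;>
                  norm_num <;> omega

-- ===== VERDICT =====
theorem infer_head_type_py_spec : Claim_equal_infer_head_type_py := by
  intro sd _
  unfold Spec_infer_head_type_py infer_head_type_py infer_head_type_py_alt
  cases hks : (PySem.Dict.ofList sd).keys with
  | nil => simp [PySem.List.min?]
  | cons k ks =>
      simp only [List.map_cons, PySem.List.min?_id_cons]
      rw [show (ks.map pvRank).foldl min (pvRank k) = ((k :: ks).map pvRank).foldl min 3 by
        simp only [List.map_cons, List.foldl_cons]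
        congr 1
        unfold pvRank; split_ifs <;> rfl]
      rw [foldl_min_rank _ _ (by omega)]
      split_ifs <;> rfl
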